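-- pv_equiv track=rewrite | github.com/vishnuodeyar/MoocFi-Python | MoocFi_python_part_4/neighbours_in_the_list.py | longest_series_in_neighbours
-- ===== SOURCE A (Python) =====
-- def longest_series_in_neighbours(my_list : list):
--   longest = 1
--   result = 1
--   for i in range(1, len(my_list)):
--     if abs(my_list[i] - my_list[i-1]) == 1:
--       result += 1
--     else:
--       result = 1
--     longest = max(longest, result)
--   return longest
-- ===== SOURCE B (Python) =====
-- def longest_series_in_neighbours(my_list : list):
--   # two-pass: build adjacency flags, then find the longest run of True flags
--   flags = [abs(b - a) == 1 for a, b in zip(my_list, my_list[1:])]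
--   best = 0
--   i = 0
--   n = len(flags)
--   while i < n:
--     if flags[i]:
--       j = i
--       while j < n and flags[j]:
--         j += 1
--       best = max(best, j - i)
--       i = j
--     else:
--       i += 1
--   return best + 1
-- ===== Notes on version B (the rewrite author's own statement) =====
-- stated objective: alternative
-- what changed: A fuses everything into one indexed loop carrying (longest, current-run) accumulators; B first builds the list of adjacency flags (|a[i+1]-a[i]|==1) in one pass, then scans it splitting off whole runs of True flags and returns the longest such run plus 1.
import Mathlib
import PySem

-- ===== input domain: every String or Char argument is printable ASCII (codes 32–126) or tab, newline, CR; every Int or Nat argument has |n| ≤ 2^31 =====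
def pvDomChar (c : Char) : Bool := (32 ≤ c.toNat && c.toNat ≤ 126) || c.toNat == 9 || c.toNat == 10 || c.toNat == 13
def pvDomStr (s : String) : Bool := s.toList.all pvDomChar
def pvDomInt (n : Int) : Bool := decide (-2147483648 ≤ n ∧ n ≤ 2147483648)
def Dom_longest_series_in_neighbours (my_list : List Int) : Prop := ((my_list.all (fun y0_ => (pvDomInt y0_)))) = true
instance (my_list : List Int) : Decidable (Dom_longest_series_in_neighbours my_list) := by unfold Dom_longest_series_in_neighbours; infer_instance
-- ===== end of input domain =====

-- B replaces A's fused max-accumulator loop by a two-pass decomposition (adjacency flags, then longest True run); objective: alternative.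


-- ===== PORT A =====
-- literal transliteration of A: indices via range(1, len), state (longest, result); indices are always in range, so pyGetD's default is never used
def longest_series_in_neighbours (my_list : List Int) : Int :=
  ((PySem.List.pyRange 1 (my_list.length : Int) 1).foldl
    (fun (st : Int × Int) i =>
      let result : Int :=
        if (PySem.List.pyGetD my_list i 0 - PySem.List.pyGetD my_list (i - 1) 0).natAbs = 1
        then st.2 + 1 else 1
      (max st.1 result, result)) ((1 : Int), (1 : Int))).1

-- ===== PORT B =====
-- B-side helper: the outer while loop of Source B — skip a False, or split off the whole True run and record its length
def pvMaxRunLoop : List Bool → Int → Int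
  | [], best => best
  | false :: fs, best => pvMaxRunLoop fs best
  | true :: fs, best =>
      pvMaxRunLoop (fs.dropWhile (fun b => b)) (max best (1 + ((fs.takeWhile (fun b => b)).length : Int)))
  termination_by fs _ => fs.length
  decreasing_by
    · simp
    · have := List.length_dropWhile_le (fun b => b) fs; simp; omega

def longest_series_in_neighbours_alt (my_list : List Int) : Int :=
  let flags := (my_list.zip (PySem.List.slice my_list (some 1) none)).map
    (fun p => (p.2 - p.1).natAbs == 1)
  pvMaxRunLoop flags 0 + 1

-- ===== PRECONDITION & SPEC =====
def Spec_longest_series_in_neighbours (my_list : List Int) (out : Int) : Prop := out = longest_series_in_neighbours_alt my_list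
instance (my_list : List Int) (out : Int) : Decidable (Spec_longest_series_in_neighbours my_list out) := by unfold Spec_longest_series_in_neighbours; infer_instance

-- ===== CLAIM (what is proved, stated in full; the proofs are below) =====
def Claim_equal_longest_series_in_neighbours : Prop := ∀ (my_list : List Int), Dom_longest_series_in_neighbours my_list → Spec_longest_series_in_neighbours my_list (longest_series_in_neighbours my_list)

-- ===== LEMMAS AND PROOFS =====

-- proof-side: A's loop body as a step on the adjacency flag, and the flag list itself
def pvStep (st : Int × Int) (f : Bool) : Int × Int :=
  let r : Int := if f then st.2 + 1 else 1
  (max st.1 r, r)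

def pvFlags (l : List Int) : List Bool := (l.zip l.tail).map (fun p => (p.2 - p.1).natAbs == 1)

-- proof-side: accumulator-free form of pvMaxRunLoop
def pvMaxRun : List Bool → Int
  | [] => 0
  | false :: fs => pvMaxRun fs
  | true :: fs => max (1 + ((fs.takeWhile (fun b => b)).length : Int)) (pvMaxRun (fs.dropWhile (fun b => b)))
  termination_by fs => fs.length
  decreasing_by
    · simp
    · have := List.length_dropWhile_le (fun b => b) fs; simp; omega

theorem pvMaxRun_nonneg (fl : List Bool) : 0 ≤ pvMaxRun fl := by
  fun_induction pvMaxRun fl with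
  | case1 => simp
  | case2 fs ih => simpa [pvMaxRun] using ih
  | case3 fs ih => positivity

theorem pvMaxRunLoop_eq (fl : List Bool) (best : Int) (h : 0 ≤ best) :
    pvMaxRunLoop fl best = max best (pvMaxRun fl) := by
  induction fl using pvMaxRun.induct generalizing best with
  | case1 => simp [pvMaxRunLoop, pvMaxRun, max_eq_left h]
  | case2 fs ih => rw [pvMaxRunLoop, pvMaxRun, ih best h]
  | case3 fs ih =>
      rw [pvMaxRunLoop, pvMaxRun, ih _ (le_trans h (le_max_left _ _)), max_assoc]

theorem pvRun_succ (fs : List Bool) :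
    max (1 + ((fs.takeWhile (fun b => b)).length : Int)) (pvMaxRun (fs.dropWhile (fun b => b)) + 1)
      = pvMaxRun fs + 1 := by
  match fs with
  | [] => simp [pvMaxRun]
  | false :: fs' =>
      simp only [List.takeWhile_cons, List.dropWhile_cons]
      norm_num
      have h : pvMaxRun (false :: fs') = pvMaxRun fs' := by simp [pvMaxRun]
      rw [h]
      have := pvMaxRun_nonneg fs'
      omega
  | true :: fs' =>
      simp only [List.takeWhile_cons, List.dropWhile_cons]
      norm_num
      have h : pvMaxRun (true :: fs')
          = max (1 + ((fs'.takeWhile (fun b => b)).length : Int)) (pvMaxRun (fs'.dropWhile (fun b => b))) := by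
        simp [pvMaxRun]
      rw [h]
      omega

theorem pvFold_eq (fl : List Bool) : ∀ (L r : Int), 1 ≤ r → r ≤ L →
    (fl.foldl pvStep (L, r)).1
      = max L (max (r + ((fl.takeWhile (fun b => b)).length : Int)) (pvMaxRun (fl.dropWhile (fun b => b)) + 1)) := by
  induction fl with
  | nil => intro L r h1 h2; simp [pvMaxRun]; omega
  | cons f fs ih =>
      intro L r h1 h2
      cases f with
      | false =>
          have : pvStep (L, r) false = (max L 1, 1) := by simp [pvStep]
          rw [List.foldl_cons, this, ih (max L 1) 1 le_rfl (le_max_right _ _)]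
          rw [pvRun_succ fs]
          simp only [List.takeWhile_cons, List.dropWhile_cons]
          norm_num
          have h : pvMaxRun (false :: fs) = pvMaxRun fs := by simp [pvMaxRun]
          rw [h]
          have := pvMaxRun_nonneg fs
          omega
      | true =>
          have : pvStep (L, r) true = (max L (r + 1), r + 1) := by simp [pvStep]
          rw [List.foldl_cons, this,
            ih (max L (r + 1)) (r + 1) (by omega) (le_max_right _ _)]
          simp only [List.takeWhile_cons, List.dropWhile_cons]
          norm_num
          omega

-- A's indexed loop body, as a named function of the whole list
def pvBody (l : List Int) (st : Int × Int) (i : Int) : Int × Int :=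
  let result : Int :=
    if (PySem.List.pyGetD l i 0 - PySem.List.pyGetD l (i - 1) 0).natAbs = 1
    then st.2 + 1 else 1
  (max st.1 result, result)

theorem pvBody_eq_step (l : List Int) (st : Int × Int) (i : Int) :
    pvBody l st i = pvStep st ((PySem.List.pyGetD l i 0 - PySem.List.pyGetD l (i - 1) 0).natAbs == 1) := by
  simp [pvBody, pvStep]

theorem pvBody_shift (x : Int) (l : List Int) (st : Int × Int) (k : Nat) :
    pvBody (x :: l) st (2 + (k : Int)) = pvBody l st (1 + (k : Int)) := by
  simp only [pvBody]
  rw [show (2 : Int) + (k : Int) - 1 = ((k + 1 : Nat) : Int) by push_cast; ring,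
    show (2 : Int) + (k : Int) = ((k + 2 : Nat) : Int) by push_cast; ring,
    show (1 : Int) + (k : Int) - 1 = ((k : Nat) : Int) by ring,
    show (1 : Int) + (k : Int) = ((k + 1 : Nat) : Int) by push_cast; ring]
  simp only [PySem.List.pyGetD_natCast]
  simp only [List.getD_eq_getElem?_getD, List.getElem?_cons_succ]

theorem pvShift (x : Int) (l : List Int) (st : Int × Int) :
    (PySem.List.pyRange 2 ((l.length : Int) + 1) 1).foldl (pvBody (x :: l)) st
      = (PySem.List.pyRange 1 ((l.length : Int)) 1).foldl (pvBody l) st := by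
  rw [PySem.List.pyRange_one 2, PySem.List.pyRange_one 1]
  have hlen : ((l.length : Int) + 1 - 2).toNat = ((l.length : Int) - 1).toNat := by omega
  rw [hlen, List.foldl_map, List.foldl_map]
  congr 1
  funext st k
  exact pvBody_shift x l st k

theorem pvBridge (l : List Int) : ∀ (x : Int) (st : Int × Int),
    (PySem.List.pyRange 1 (((x :: l).length : Int)) 1).foldl (pvBody (x :: l)) st
      = (pvFlags (x :: l)).foldl pvStep st := by
  induction l with
  | nil =>
      intro x st
      simp [PySem.List.pyRange_one_eq_nil, pvFlags]
  | cons y l ih =>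
      intro x st
      have hn : ((x :: y :: l).length : Int) = (l.length : Int) + 2 := by simp; ring
      rw [hn, PySem.List.pyRange_one_cons (by omega), List.foldl_cons]
      have hstep : pvBody (x :: y :: l) st 1 = pvStep st ((y - x).natAbs == 1) := by
        rw [pvBody_eq_step]
        norm_num
        rw [show (1 : Int) = ((1 : Nat) : Int) by norm_num, PySem.List.pyGetD_natCast]
        simp [List.getD]
      have h2 : (1 : Int) + 1 = 2 := by norm_num
      have hb : ((l.length : Int) + 2) = (((y :: l).length : Int) + 1) := by simp; ring
      rw [hstep, h2, hb, pvShift x (y :: l)]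
      have := ih y (pvStep st ((y - x).natAbs == 1))
      rw [this]
      simp [pvFlags]

theorem pvA_eq (l : List Int) : longest_series_in_neighbours l = pvMaxRun (pvFlags l) + 1 := by
  match l with
  | [] =>
      simp [longest_series_in_neighbours, pvFlags, pvMaxRun,
        PySem.List.pyRange_one_eq_nil (by norm_num : (0 : Int) ≤ 1)]
  | x :: l =>
      have hb : longest_series_in_neighbours (x :: l)
          = ((pvFlags (x :: l)).foldl pvStep ((1 : Int), (1 : Int))).1 := by
        rw [← pvBridge l x ((1 : Int), (1 : Int))]
        rfl
      rw [hb, pvFold_eq (pvFlags (x :: l)) 1 1 le_rfl le_rfl, pvRun_succ]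
      have := pvMaxRun_nonneg (pvFlags (x :: l))
      omega

theorem pvAlt_eq (l : List Int) : longest_series_in_neighbours_alt l = pvMaxRun (pvFlags l) + 1 := by
  unfold longest_series_in_neighbours_alt
  simp only [PySem.List.slice_from_one]
  have h : (l.zip l.tail).map (fun p => (p.2 - p.1).natAbs == 1) = pvFlags l := rfl
  rw [h, pvMaxRunLoop_eq _ 0 le_rfl, max_eq_right (pvMaxRun_nonneg _)]

-- ===== VERDICT (by name: the statement is the Claim_ definition above) =====
theorem longest_series_in_neighbours_spec : Claim_equal_longest_series_in_neighbours := by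
  intro l _
  unfold Spec_longest_series_in_neighbours
  rw [pvA_eq, pvAlt_eq]
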